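-- pv_equiv track=rewrite | github.com/cobrasanjay1/Flames | flames.py | cut_common_letters
-- ===== SOURCE A (Python) =====
-- from collections import Counter
--
-- def cut_common_letters(str1, str2):
--     count1 = Counter(str1)
--     count2 = Counter(str2)
--     new_str1 = []
--     new_str2 = []
--     for char in str1:
--         if count1[char] > count2[char]:
--             new_str1.append(char)
--             count1[char] -= 1
--         elif count1[char] > 0 and count2[char] > 0:
--             count1[char] -= 1
--             count2[char] -= 1
--     for char in str2:
--         if count2[char] > count1[char]:
--             new_str2.append(char)
--             count2[char] -= 1
--     result_str1 = ''.join(new_str1)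
--     result_str2 = ''.join(new_str2)
--
--     return result_str1, result_str2
-- ===== SOURCE B (Python) =====
-- from collections import Counter
--
-- def cut_common_letters(str1, str2):
--     common = Counter(str1) & Counter(str2)   # multiset of letters shared by both strings
--
--     def drop_last(s, budget):
--         # remove the LAST budget[ch] occurrences of each ch, scanning from the end
--         rem = dict(budget)
--         out = []
--         for ch in reversed(s):
--             if rem.get(ch, 0) > 0:
--                 rem[ch] -= 1
--             else:
--                 out.append(ch)
--         out.reverse()
--         return ''.join(out)
--
--     return drop_last(str1, common), drop_last(str2, common)
-- ===== Notes on version B (the rewrite author's own statement) =====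
-- stated objective: alternative
-- what changed: A makes a forward keep-pass per string with two interleaved mutating counters (second pass depending on the first's leftover counters); B precomputes the shared multiset Counter(str1) & Counter(str2) once and removes exactly its letters by a single backward scan per string (deleting the LAST shared occurrences, building the output back-to-front), which is correct because keeping the first excess occurrences equals removing the last min-count occurrences.
import Mathlib
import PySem

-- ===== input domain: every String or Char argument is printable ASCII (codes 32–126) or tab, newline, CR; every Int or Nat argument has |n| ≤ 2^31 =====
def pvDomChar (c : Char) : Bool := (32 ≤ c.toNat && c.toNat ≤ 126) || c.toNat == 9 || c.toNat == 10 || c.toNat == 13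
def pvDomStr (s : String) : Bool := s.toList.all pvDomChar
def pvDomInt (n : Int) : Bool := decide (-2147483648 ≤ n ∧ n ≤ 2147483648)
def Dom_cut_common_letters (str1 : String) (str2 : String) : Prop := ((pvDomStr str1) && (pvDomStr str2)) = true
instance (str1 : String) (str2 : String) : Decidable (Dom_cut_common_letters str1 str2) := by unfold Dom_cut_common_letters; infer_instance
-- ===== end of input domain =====

-- B replaces A's forward keep-passes with interleaved mutating counters by one backward
-- removal pass per string driven by the precomputed shared multiset c1 & c2 (objective:
-- alternative, same cost): removing the last min-count occurrences keeps the first excess ones.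


-- ===== PORT A =====
-- first loop of A: state (count1, count2, new_str1)
def aStep1 (st : PySem.Dict Char Int × PySem.Dict Char Int × List Char) (ch : Char) :
    PySem.Dict Char Int × PySem.Dict Char Int × List Char :=
  if st.1.getD ch 0 > st.2.1.getD ch 0 then
    (st.1.insert ch (st.1.getD ch 0 - 1), st.2.1, st.2.2 ++ [ch])
  else if st.1.getD ch 0 > 0 ∧ st.2.1.getD ch 0 > 0 then
    (st.1.insert ch (st.1.getD ch 0 - 1), st.2.1.insert ch (st.2.1.getD ch 0 - 1), st.2.2)
  else st

-- second loop of A: count1 is fixed now; state (count2, new_str2)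
def aStep2 (count1 : PySem.Dict Char Int) (st : PySem.Dict Char Int × List Char) (ch : Char) :
    PySem.Dict Char Int × List Char :=
  if st.1.getD ch 0 > count1.getD ch 0 then
    (st.1.insert ch (st.1.getD ch 0 - 1), st.2 ++ [ch])
  else st

def cut_common_letters (str1 : String) (str2 : String) : String × String :=
  let count1 := PySem.Dict.counter str1.toList
  let count2 := PySem.Dict.counter str2.toList
  let st1 := str1.toList.foldl aStep1 (count1, count2, [])
  let st2 := str2.toList.foldl (aStep2 st1.1) (st1.2.1, [])
  (String.ofList st1.2.2, String.ofList st2.2)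

-- ===== PORT B =====
-- Counter & Counter: iterate the left counter's items, keep min with the right count when positive
def counterAnd (d1 d2 : PySem.Dict Char Int) : PySem.Dict Char Int :=
  d1.items.foldl
    (fun acc kv =>
      let m := min kv.2 (d2.getD kv.1 0)
      if m > 0 then acc.insert kv.1 m else acc)
    PySem.Dict.empty

-- the loop of drop_last: state (rem, out); skip ch while rem has budget, else append
def bStep (st : PySem.Dict Char Int × List Char) (ch : Char) :
    PySem.Dict Char Int × List Char :=
  if st.1.getD ch 0 > 0 then (st.1.insert ch (st.1.getD ch 0 - 1), st.2)
  else (st.1, st.2 ++ [ch])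

def dropLast (s : List Char) (budget : PySem.Dict Char Int) : String :=
  String.ofList ((s.reverse.foldl bStep (budget, [])).2.reverse)

def cut_common_letters_alt (str1 : String) (str2 : String) : String × String :=
  let common := counterAnd (PySem.Dict.counter str1.toList) (PySem.Dict.counter str2.toList)
  (dropLast str1.toList common, dropLast str2.toList common)

-- ===== PRECONDITION & SPEC =====
def Spec_cut_common_letters (str1 : String) (str2 : String) (out : String × String) : Prop := out = cut_common_letters_alt str1 str2
instance (str1 : String) (str2 : String) (out : String × String) : Decidable (Spec_cut_common_letters str1 str2 out) := by unfold Spec_cut_common_letters; infer_instance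

-- ===== CLAIM (what is proved, stated in full; the proofs are below) =====
def Claim_equal_cut_common_letters : Prop := ∀ (str1 : String) (str2 : String), Dom_cut_common_letters str1 str2 → Spec_cut_common_letters str1 str2 (cut_common_letters str1 str2)

-- ===== LEMMAS AND PROOFS =====

-- count of c in l, as an Int
def cntI (c : Char) (l : List Char) : Int := (l.count c : Int)

theorem cntI_nil (c : Char) : cntI c [] = 0 := rfl

theorem cntI_nonneg (c : Char) (l : List Char) : 0 ≤ cntI c l := Int.natCast_nonneg _

theorem cntI_cons_self (c : Char) (t : List Char) : cntI c (c :: t) = cntI c t + 1 := by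
  simp [cntI]

theorem cntI_cons_of_ne (c ch : Char) (t : List Char) (h : c ≠ ch) :
    cntI c (ch :: t) = cntI c t := by
  simp [cntI, Ne.symm h]

theorem cntI_reverse (c : Char) (l : List Char) : cntI c l.reverse = cntI c l := by
  simp [cntI]

theorem cntI_eq_zero_of_not_mem (c : Char) (l : List Char) (h : c ∉ l) : cntI c l = 0 := by
  simp [cntI, List.count_eq_zero.mpr h]

-- decrement a function budget at one char
def dec (e : Char → Int) (c : Char) : Char → Int := fun d => if d = c then e c - 1 else e d

theorem dec_self (e : Char → Int) (c : Char) : dec e c c = e c - 1 := if_pos rfl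

theorem dec_ne (e : Char → Int) (c d : Char) (h : d ≠ c) : dec e c d = e d := if_neg h

-- reference emitter: keep a char while its (function) budget is positive, decrementing
def emitF : List Char → (Char → Int) → List Char
  | [], _ => []
  | c :: t, e => if e c > 0 then c :: emitF t (dec e c) else emitF t e

-- reference dropper: skip a char while its (function) budget is positive, decrementing
def dropF : List Char → (Char → Int) → List Char
  | [], _ => []
  | c :: t, r => if r c > 0 then dropF t (dec r c) else c :: dropF t r

theorem emitF_congr (L : List Char) : ∀ (e e' : Char → Int),
    (∀ c, max (e c) 0 = max (e' c) 0) → emitF L e = emitF L e' := by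
  induction L with
  | nil => intro e e' _; rfl
  | cons c t ih =>
    intro e e' h
    have hc := h c
    by_cases hp : e c > 0
    · have hp' : e' c > 0 := by omega
      simp only [emitF, if_pos hp, if_pos hp']
      refine congrArg _ (ih _ _ fun d => ?_)
      by_cases hd : d = c
      · subst hd; rw [dec_self, dec_self]; omega
      · rw [dec_ne _ _ _ hd, dec_ne _ _ _ hd]; exact h d
    · have hp' : ¬ e' c > 0 := by omega
      simp only [emitF, if_neg hp, if_neg hp']
      exact ih _ _ h

-- dropping over xs ++ [c] : c survives iff the budget is exhausted by xs
theorem dropF_append (c : Char) : ∀ (xs : List Char) (r : Char → Int),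
    dropF (xs ++ [c]) r
      = dropF xs r ++ (if r c - cntI c xs > 0 then [] else [c]) := by
  intro xs
  induction xs with
  | nil =>
    intro r
    by_cases h : r c > 0
    · simp [dropF, h, cntI_nil]
    · simp [dropF, h, cntI_nil]
  | cons d ys ih =>
    intro r
    by_cases h : r d > 0
    · simp only [List.cons_append, dropF, if_pos h]
      rw [ih]
      congr 1
      by_cases hdc : c = d
      · subst hdc
        rw [dec_self, cntI_cons_self]
        by_cases u : r c - 1 - cntI c ys > 0
        · rw [if_pos u, if_pos (by omega : r c - (cntI c ys + 1) > 0)]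
        · rw [if_neg u, if_neg (by omega : ¬ r c - (cntI c ys + 1) > 0)]
      · rw [dec_ne _ _ _ hdc, cntI_cons_of_ne _ _ _ hdc]
    · simp only [List.cons_append, dropF, if_neg h]
      rw [ih]
      by_cases hdc : c = d
      · subst hdc
        rw [cntI_cons_self]
        have hys := cntI_nonneg c ys
        rw [if_neg (by omega : ¬ r c - cntI c ys > 0),
            if_neg (by omega : ¬ r c - (cntI c ys + 1) > 0)]
      · rw [cntI_cons_of_ne _ _ _ hdc]

-- the bridge: keeping the first max(count-r,0) occurrences = dropping, from the END, r of each
theorem emitF_eq_dropF_reverse : ∀ (L : List Char) (r : Char → Int),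
    emitF L (fun c => max (cntI c L - r c) 0) = (dropF L.reverse r).reverse := by
  intro L
  induction L with
  | nil => intro r; rfl
  | cons c t ih =>
    intro r
    rw [List.reverse_cons, dropF_append, List.reverse_append]
    rw [cntI_reverse]
    by_cases h : r c - cntI c t > 0
    · -- c is removed from the end; its budget is exhausted by the whole count
      have he : ¬ (max (cntI c (c :: t) - r c) 0 > 0) := by
        rw [cntI_cons_self]; omega
      simp only [emitF, if_neg he, if_pos h, List.reverse_nil, List.nil_append]
      rw [← ih r]
      refine emitF_congr t _ _ fun d => ?_
      by_cases hd : d = c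
      · subst hd; rw [cntI_cons_self]; omega
      · rw [cntI_cons_of_ne _ _ _ hd]
    · -- c survives
      have he : max (cntI c (c :: t) - r c) 0 > 0 := by
        rw [cntI_cons_self]; have := cntI_nonneg c t; omega
      simp only [emitF, if_pos he, if_neg h, List.reverse_cons, List.reverse_nil,
        List.nil_append, List.singleton_append]
      rw [← ih r]
      refine congrArg _ (emitF_congr t _ _ fun d => ?_)
      by_cases hd : d = c
      · subst hd
        rw [dec_self]
        rw [cntI_cons_self] at he ⊢
        omega
      · rw [dec_ne _ _ _ hd, cntI_cons_of_ne _ _ _ hd]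

-- A's first loop emits with budget count1 - count2 (count1 tracks the remaining suffix);
-- also: final count1 is 0 everywhere and final count2 is count2 - min(suffix count, count2)
theorem loop1_emit : ∀ (r : List Char) (c1 c2 : PySem.Dict Char Int) (acc : List Char),
    (∀ c, c1.getD c 0 = cntI c r) → (∀ c, 0 ≤ c2.getD c 0) →
    (r.foldl aStep1 (c1, c2, acc)).2.2
        = acc ++ emitF r (fun c => c1.getD c 0 - c2.getD c 0)
    ∧ (∀ c, (r.foldl aStep1 (c1, c2, acc)).1.getD c 0 = 0)
    ∧ (∀ c, (r.foldl aStep1 (c1, c2, acc)).2.1.getD c 0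
          = c2.getD c 0 - min (cntI c r) (c2.getD c 0)) := by
  intro r
  induction r with
  | nil =>
    intro c1 c2 acc h1 h2
    refine ⟨by simp [emitF], fun c => by simpa [cntI_nil] using h1 c, fun c => by
      have := h2 c; simp [cntI_nil]; omega⟩
  | cons ch t ih =>
    intro c1 c2 acc h1 h2
    have e1 := h1 ch
    rw [cntI_cons_self] at e1
    have hnt := cntI_nonneg ch t
    by_cases hA : c1.getD ch 0 > c2.getD ch 0
    · -- keep branch ↔ positive budget
      have hb : c1.getD ch 0 - c2.getD ch 0 > 0 := by omega
      simp only [List.foldl_cons,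
        show aStep1 (c1, c2, acc) ch
            = (c1.insert ch (c1.getD ch 0 - 1), c2, acc ++ [ch]) by simp [aStep1, hA],
        emitF, if_pos hb]
      obtain ⟨ho, hf1, hf2⟩ := ih (c1.insert ch (c1.getD ch 0 - 1)) c2 (acc ++ [ch])
        (fun c => by
          by_cases hc : c = ch
          · subst hc; rw [PySem.Dict.getD_insert_self]; omega
          · rw [PySem.Dict.getD_insert_of_ne _ _ _ hc, h1 c, cntI_cons_of_ne _ _ _ hc])
        h2
      refine ⟨?_, hf1, fun c => ?_⟩
      · rw [ho, List.append_assoc, List.singleton_append]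
        refine congrArg _ (congrArg _ (emitF_congr t _ _ fun d => ?_))
        by_cases hd : d = ch
        · rw [hd, PySem.Dict.getD_insert_self, dec_self]; omega
        · rw [PySem.Dict.getD_insert_of_ne _ _ _ hd, dec_ne _ _ _ hd]
      · rw [hf2 c]
        by_cases hc : c = ch
        · rw [hc, cntI_cons_self]; have := h2 ch; omega
        · rw [cntI_cons_of_ne _ _ _ hc]
    · -- elif branch (both counts positive, since count1 ch = suffix count ≥ 1)
      have hpos : c1.getD ch 0 > 0 ∧ c2.getD ch 0 > 0 := by
        constructor <;> omega
      have hb : ¬ c1.getD ch 0 - c2.getD ch 0 > 0 := by omega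
      simp only [List.foldl_cons,
        show aStep1 (c1, c2, acc) ch
            = (c1.insert ch (c1.getD ch 0 - 1), c2.insert ch (c2.getD ch 0 - 1), acc) by
          simp [aStep1, hA, hpos],
        emitF, if_neg hb]
      obtain ⟨ho, hf1, hf2⟩ := ih (c1.insert ch (c1.getD ch 0 - 1))
        (c2.insert ch (c2.getD ch 0 - 1)) acc
        (fun c => by
          by_cases hc : c = ch
          · subst hc; rw [PySem.Dict.getD_insert_self]; omega
          · rw [PySem.Dict.getD_insert_of_ne _ _ _ hc, h1 c, cntI_cons_of_ne _ _ _ hc])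
        (fun c => by
          by_cases hc : c = ch
          · subst hc; rw [PySem.Dict.getD_insert_self]; omega
          · rw [PySem.Dict.getD_insert_of_ne _ _ _ hc]; exact h2 c)
      refine ⟨?_, hf1, fun c => ?_⟩
      · rw [ho]
        refine congrArg _ (emitF_congr t _ _ fun d => ?_)
        by_cases hd : d = ch
        · rw [hd, PySem.Dict.getD_insert_self, PySem.Dict.getD_insert_self]; omega
        · rw [PySem.Dict.getD_insert_of_ne _ _ _ hd, PySem.Dict.getD_insert_of_ne _ _ _ hd]
      · rw [hf2 c]
        by_cases hc : c = ch
        · rw [hc, PySem.Dict.getD_insert_self, cntI_cons_self]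
          have := h2 ch; omega
        · rw [PySem.Dict.getD_insert_of_ne _ _ _ hc, cntI_cons_of_ne _ _ _ hc]

-- A's second loop, with final count1 = 0 everywhere, emits with budget count2
theorem loop2_emit (F : PySem.Dict Char Int) (hF : ∀ c, F.getD c 0 = 0) :
    ∀ (r : List Char) (c2 : PySem.Dict Char Int) (acc : List Char),
    (r.foldl (aStep2 F) (c2, acc)).2 = acc ++ emitF r (fun c => c2.getD c 0) := by
  intro r
  induction r with
  | nil => intro c2 acc; simp [emitF]
  | cons ch t ih =>
    intro c2 acc
    by_cases hA : c2.getD ch 0 > 0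
    · have hgt : c2.getD ch 0 > F.getD ch 0 := by rw [hF ch]; exact hA
      simp only [List.foldl_cons,
        show aStep2 F (c2, acc) ch
            = (c2.insert ch (c2.getD ch 0 - 1), acc ++ [ch]) by simp [aStep2, hgt],
        emitF, if_pos hA]
      rw [ih, List.append_assoc, List.singleton_append]
      refine congrArg _ (congrArg _ (emitF_congr t _ _ fun d => ?_))
      by_cases hd : d = ch
      · rw [hd, PySem.Dict.getD_insert_self, dec_self]
      · rw [PySem.Dict.getD_insert_of_ne _ _ _ hd, dec_ne _ _ _ hd]
    · have hng : ¬ c2.getD ch 0 > F.getD ch 0 := by rw [hF ch]; exact hA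
      simp only [List.foldl_cons,
        show aStep2 F (c2, acc) ch = (c2, acc) by simp [aStep2, hng],
        emitF, if_neg hA]
      exact ih c2 acc

-- B's fold is dropF with the dict read as a function
theorem bfold_drop : ∀ (r : List Char) (rem : PySem.Dict Char Int) (acc : List Char),
    (r.foldl bStep (rem, acc)).2 = acc ++ dropF r (fun c => rem.getD c 0) := by
  intro r
  induction r with
  | nil => intro rem acc; simp [dropF]
  | cons ch t ih =>
    intro rem acc
    by_cases h : rem.getD ch 0 > 0
    · simp only [List.foldl_cons,
        show bStep (rem, acc) ch = (rem.insert ch (rem.getD ch 0 - 1), acc) by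
          simp [bStep, h],
        dropF, if_pos h]
      rw [ih]
      refine congrArg _ (congrArg _ (funext fun d => ?_))
      by_cases hd : d = ch
      · rw [hd, PySem.Dict.getD_insert_self, dec_self]
      · rw [PySem.Dict.getD_insert_of_ne _ _ _ hd, dec_ne _ _ _ hd]
    · simp only [List.foldl_cons,
        show bStep (rem, acc) ch = (rem, acc ++ [ch]) by simp [bStep, h],
        dropF, if_neg h]
      rw [ih, List.append_assoc, List.singleton_append]

-- fold building counterAnd over a nodup key list, read back through getD
theorem counterAnd_fold_getD (g : Char → Int) (d2 : PySem.Dict Char Int) (c : Char) :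
    ∀ (ks : List Char), ks.Nodup → ∀ (acc : PySem.Dict Char Int),
    ((ks.map (fun k => (k, g k))).foldl
        (fun acc kv =>
          let m := min kv.2 (d2.getD kv.1 0)
          if m > 0 then acc.insert kv.1 m else acc)
        acc).getD c 0
      = if c ∈ ks ∧ min (g c) (d2.getD c 0) > 0 then min (g c) (d2.getD c 0)
        else acc.getD c 0 := by
  intro ks
  induction ks with
  | nil => intro _ acc; simp
  | cons k t ih =>
    intro hnd acc
    obtain ⟨hk, hnd'⟩ := List.nodup_cons.mp hnd
    simp only [List.map_cons, List.foldl_cons]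
    rw [ih hnd']
    by_cases hc : c = k
    · subst hc
      have hct : c ∉ t := hk
      by_cases hm : min (g c) (d2.getD c 0) > 0
      · simp only [if_pos hm]
        have : (c ∈ c :: t ∧ min (g c) (d2.getD c 0) > 0) := ⟨List.mem_cons_self, hm⟩
        rw [if_pos this, if_neg (fun h => hct h.1), PySem.Dict.getD_insert_self]
      · simp only [if_neg hm]
        rw [if_neg (fun h => hct h.1), if_neg (fun h => hm h.2)]
    · have hmem : (c ∈ k :: t ∧ min (g c) (d2.getD c 0) > 0)
          ↔ (c ∈ t ∧ min (g c) (d2.getD c 0) > 0) := by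
        constructor
        · rintro ⟨hm, hp⟩
          rcases List.mem_cons.mp hm with h | h
          · exact absurd h hc
          · exact ⟨h, hp⟩
        · rintro ⟨hm, hp⟩; exact ⟨List.mem_cons_of_mem _ hm, hp⟩
      by_cases hm : min (g k) (d2.getD k 0) > 0
      · simp only [if_pos hm]
        rw [PySem.Dict.getD_insert_of_ne _ _ _ hc]
        by_cases h : c ∈ t ∧ min (g c) (d2.getD c 0) > 0
        · rw [if_pos h, if_pos (hmem.mpr h)]
        · rw [if_neg h, if_neg (fun hh => h (hmem.mp hh))]
      · simp only [if_neg hm]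
        by_cases h : c ∈ t ∧ min (g c) (d2.getD c 0) > 0
        · rw [if_pos h, if_pos (hmem.mpr h)]
        · rw [if_neg h, if_neg (fun hh => h (hmem.mp hh))]

-- the shared multiset: counterAnd of the two counters reads back as the pointwise min
theorem counterAnd_getD (L1 L2 : List Char) (c : Char) :
    (counterAnd (PySem.Dict.counter L1) (PySem.Dict.counter L2)).getD c 0
      = min (cntI c L1) (cntI c L2) := by
  unfold counterAnd
  rw [PySem.Dict.items_counter]
  rw [counterAnd_fold_getD (fun k => (L1.count k : Int)) (PySem.Dict.counter L2) c
      (PySem.Set.ofList L1) (PySem.Set.nodup_ofList L1) PySem.Dict.empty]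
  have h2 : (PySem.Dict.counter L2).getD c 0 = cntI c L2 := PySem.Dict.getD_counter L2 c
  by_cases hmem : c ∈ L1
  · have hc : c ∈ PySem.Set.ofList L1 := (PySem.Set.mem_ofList L1 c).mpr hmem
    by_cases hm : min ((L1.count c : Int)) ((PySem.Dict.counter L2).getD c 0) > 0
    · rw [if_pos ⟨hc, hm⟩, h2]; rfl
    · rw [if_neg (fun h => hm h.2), PySem.Dict.getD_empty]
      rw [h2] at hm
      have := cntI_nonneg c L1; have := cntI_nonneg c L2
      simp only [cntI] at *
      omega
  · have hc : c ∉ PySem.Set.ofList L1 := fun h => hmem ((PySem.Set.mem_ofList L1 c).mp h)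
    rw [if_neg (fun h => hc h.1), PySem.Dict.getD_empty]
    have h0 : cntI c L1 = 0 := cntI_eq_zero_of_not_mem c L1 hmem
    have := cntI_nonneg c L2
    omega

-- ===== VERDICT (by name: the statement is the Claim_ definition above) =====
theorem cut_common_letters_spec : Claim_equal_cut_common_letters := by
  intro str1 str2 _
  unfold Spec_cut_common_letters cut_common_letters cut_common_letters_alt dropLast
  set L1 := str1.toList
  set L2 := str2.toList
  have hc1 : ∀ c, (PySem.Dict.counter L1).getD c 0 = cntI c L1 := fun c =>
    PySem.Dict.getD_counter L1 c
  have hc2 : ∀ c, (PySem.Dict.counter L2).getD c 0 = cntI c L2 := fun c =>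
    PySem.Dict.getD_counter L2 c
  obtain ⟨ho1, hF, hG⟩ :=
    loop1_emit L1 (PySem.Dict.counter L1) (PySem.Dict.counter L2) []
      hc1 (fun c => by rw [hc2 c]; exact cntI_nonneg c L2)
  have ho2 :=
    loop2_emit (L1.foldl aStep1 (PySem.Dict.counter L1, PySem.Dict.counter L2, [])).1 hF
      L2 (L1.foldl aStep1 (PySem.Dict.counter L1, PySem.Dict.counter L2, [])).2.1 []
  have hbr : ∀ c, (counterAnd (PySem.Dict.counter L1) (PySem.Dict.counter L2)).getD c 0
      = min (cntI c L1) (cntI c L2) := counterAnd_getD L1 L2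
  have hb1 :
      ((L1.reverse.foldl bStep
          (counterAnd (PySem.Dict.counter L1) (PySem.Dict.counter L2), [])).2).reverse
        = emitF L1 (fun c => (PySem.Dict.counter L1).getD c 0
            - (PySem.Dict.counter L2).getD c 0) := by
    rw [bfold_drop, List.nil_append]
    rw [show (fun c => (counterAnd (PySem.Dict.counter L1) (PySem.Dict.counter L2)).getD c 0)
          = (fun c => min (cntI c L1) (cntI c L2)) from funext hbr]
    rw [← emitF_eq_dropF_reverse L1 (fun c => min (cntI c L1) (cntI c L2))]
    refine emitF_congr L1 _ _ fun c => ?_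
    rw [hc1 c, hc2 c]
    have := cntI_nonneg c L1; have := cntI_nonneg c L2
    omega
  have hb2 :
      ((L2.reverse.foldl bStep
          (counterAnd (PySem.Dict.counter L1) (PySem.Dict.counter L2), [])).2).reverse
        = emitF L2 (fun c =>
            (L1.foldl aStep1 (PySem.Dict.counter L1, PySem.Dict.counter L2, [])).2.1.getD c 0) := by
    rw [bfold_drop, List.nil_append]
    rw [show (fun c => (counterAnd (PySem.Dict.counter L1) (PySem.Dict.counter L2)).getD c 0)
          = (fun c => min (cntI c L1) (cntI c L2)) from funext hbr]
    rw [← emitF_eq_dropF_reverse L2 (fun c => min (cntI c L1) (cntI c L2))]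
    refine emitF_congr L2 _ _ fun c => ?_
    rw [hG c, hc2 c]
    have := cntI_nonneg c L1; have := cntI_nonneg c L2
    omega
  simp only [Prod.mk.injEq]
  constructor
  · rw [ho1, List.nil_append, ← hb1]
  · rw [ho2, List.nil_append, ← hb2]
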